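-- pv_equiv track=rewrite | github.com/shrutijha05/MyPython | .github/workflows/Symmetric Difference.py | sym
-- ===== SOURCE A (Python) =====
-- def sym(args):
--     a1=args.pop()
--     a2=args.pop()
--     l=[]
--     for i in a1:
--         if((i not in a2) and (i not in l)):
--             l.append(i)
--     for i in a2:
--         if((i not in a1) and (i not in l)):
--             l.append(i)
--     args.append(sorted(l))
--     if(len(args)>1):
--         s=sym(args)
--         return(s)
--     else:
--         return(args[0])
-- ===== SOURCE B (Python) =====
-- def sym(args):
--     counts = {}
--     for lst in args:
--         for x in dict.fromkeys(lst):
--             counts[x] = counts.get(x, 0) + 1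
--     return sorted(x for x, c in counts.items() if c % 2 == 1)
-- ===== Notes on version B (the rewrite author's own statement) =====
-- stated objective: faster
-- what changed: Replaced the recursive pairwise symmetric-difference fold (with linear list-membership scans) by a single occurrence-counting pass over all lists using a dict, returning the sorted values with an odd tally.
import Mathlib
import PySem

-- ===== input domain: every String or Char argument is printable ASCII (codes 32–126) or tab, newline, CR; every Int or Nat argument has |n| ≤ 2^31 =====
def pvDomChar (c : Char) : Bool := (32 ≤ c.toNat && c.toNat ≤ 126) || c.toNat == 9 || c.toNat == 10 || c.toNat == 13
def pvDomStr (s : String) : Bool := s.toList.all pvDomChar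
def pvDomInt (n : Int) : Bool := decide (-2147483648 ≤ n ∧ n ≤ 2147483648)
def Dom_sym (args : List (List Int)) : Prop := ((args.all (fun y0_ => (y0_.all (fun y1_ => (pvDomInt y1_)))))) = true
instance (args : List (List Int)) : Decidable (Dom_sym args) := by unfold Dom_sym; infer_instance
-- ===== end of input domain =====

-- B replaces A's recursive pairwise symmetric-difference fold by one occurrence-counting pass
-- (tally each distinct value per list, keep odd tallies, sort). Equivalence is about the RETURN
-- value only: Python A mutates args in place (pops all lists, leaves [result]); B does not.

-- ===== PORT A =====
def sym (args : List (List Int)) : List Int :=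
  match h : args.reverse with
  | a1 :: a2 :: rest =>
      -- l = [] ; for i in a1: if i not in a2 and i not in l: l.append(i)
      let l1 := a1.foldl (fun l i => if i ∉ a2 ∧ i ∉ l then l ++ [i] else l) ([] : List Int)
      -- for i in a2: if i not in a1 and i not in l: l.append(i)
      let l := a2.foldl (fun l i => if i ∉ a1 ∧ i ∉ l then l ++ [i] else l) l1
      let args' := rest.reverse ++ [PySem.List.sorted l (fun x => x) false]
      if args'.length > 1 then sym args'
      else PySem.List.pyGetD args' 0 []
  | _ => []   -- Python raises IndexError here (fewer than two lists); excluded by Pre_sym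
termination_by args.length
decreasing_by
  have hl := congrArg List.length h
  simp at hl ⊢
  omega

-- ===== PORT B =====
def sym_alt (args : List (List Int)) : List Int :=
  let counts : PySem.Dict Int Int :=
    args.foldl (fun d lst =>
      (PySem.List.dedup lst).foldl (fun d x => d.insert x (d.getD x 0 + 1)) d)
      PySem.Dict.empty
  PySem.List.sorted
    ((counts.items.filter (fun p => PySem.Int.mod p.2 2 == 1)).map Prod.fst)
    (fun x => x) false

-- ===== PRECONDITION & SPEC =====
-- Pre_sym excludes exactly the inputs with fewer than two lists, on which Python A raises
-- IndexError (args.pop() on an empty/one-element list).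
def Pre_sym (args : List (List Int)) : Prop := 2 ≤ args.length
instance (args : List (List Int)) : Decidable (Pre_sym args) := by unfold Pre_sym; infer_instance
def pvWitness_sym : List (List Int) := [[1, 2], [2, 3]]

def Spec_sym (args : List (List Int)) (out : List Int) : Prop := out = sym_alt args
instance (args : List (List Int)) (out : List Int) : Decidable (Spec_sym args out) := by unfold Spec_sym; infer_instance

-- ===== CLAIM (what is proved, stated in full; the proofs are below) =====
def Claim_equal_sym : Prop := ∀ (args : List (List Int)), Dom_sym args → Pre_sym args → Spec_sym args (sym args)

-- ===== LEMMAS AND PROOFS =====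

-- A's inner loops: membership in the accumulated symmetric-difference list.
theorem mem_symfold (c src : List Int) (acc : List Int) (x : Int) :
    x ∈ src.foldl (fun l i => if _h : i ∉ c ∧ i ∉ l then l ++ [i] else l) acc ↔
      x ∈ acc ∨ (x ∈ src ∧ x ∉ c) := by
  induction src generalizing acc with
  | nil => simp
  | cons i t ih =>
      simp only [List.foldl_cons]
      split_ifs with hi
      · rw [ih]
        constructor
        · rintro (h | h)
          · rcases List.mem_append.1 h with h | h
            · exact Or.inl h
            · have hxi : x = i := by simpa using h
              subst hxi
              exact Or.inr ⟨List.mem_cons_self , hi.1⟩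
          · exact Or.inr ⟨List.mem_cons_of_mem _ h.1, h.2⟩
        · rintro (h | ⟨h1, hc⟩)
          · exact Or.inl (List.mem_append.2 (Or.inl h))
          · rcases List.mem_cons.1 h1 with rfl | h1
            · exact Or.inl (List.mem_append.2 (Or.inr (by simp)))
            · exact Or.inr ⟨h1, hc⟩
      · rw [ih]
        rw [not_and_or, not_not, not_not] at hi
        constructor
        · rintro (h | h)
          · exact Or.inl h
          · exact Or.inr ⟨List.mem_cons_of_mem _ h.1, h.2⟩
        · rintro (h | ⟨h1, hc⟩)
          · exact Or.inl h
          · rcases List.mem_cons.1 h1 with rfl | h1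
            · exact Or.inl (hi.resolve_left hc)
            · exact Or.inr ⟨h1, hc⟩

theorem nodup_symfold (c src : List Int) (acc : List Int) (hacc : acc.Nodup) :
    (src.foldl (fun l i => if _h : i ∉ c ∧ i ∉ l then l ++ [i] else l) acc).Nodup := by
  induction src generalizing acc with
  | nil => exact hacc
  | cons i t ih =>
      simp only [List.foldl_cons]
      split_ifs with hi
      · refine ih _ ?_
        rw [List.nodup_append]
        refine ⟨hacc, List.nodup_singleton _, ?_⟩
        intro a ha b hb
        rw [List.mem_singleton] at hb
        subst hb
        exact fun he => hi.2 (he ▸ ha)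
      · exact ih _ hacc

-- the two loops together: the deduplicated symmetric difference of a1 and a2
theorem mem_symstep (a1 a2 : List Int) (y : Int) :
    y ∈ List.foldl (fun l i => if _h : i ∉ a1 ∧ i ∉ l then l ++ [i] else l)
        (List.foldl (fun l i => if _h : i ∉ a2 ∧ i ∉ l then l ++ [i] else l) [] a1) a2 ↔
      (y ∈ a1 ∧ y ∉ a2) ∨ (y ∈ a2 ∧ y ∉ a1) := by
  rw [mem_symfold, mem_symfold]
  simp only [List.not_mem_nil, false_or]

-- how many of the lists contain x
def tally (args : List (List Int)) (x : Int) : Nat := args.countP (fun l => decide (x ∈ l))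

-- parity of the tally is preserved when the last two lists are replaced by their
-- deduplicated symmetric difference
theorem tally_step (a1 a2 : List Int) (rest : List (List Int)) (x : Int)
    (s : List Int) (hs : ∀ y, y ∈ s ↔ (y ∈ a1 ∧ y ∉ a2) ∨ (y ∈ a2 ∧ y ∉ a1)) :
    tally (rest.reverse ++ [s]) x % 2 = tally (rest.reverse ++ [a2, a1]) x % 2 := by
  unfold tally
  rw [List.countP_append, List.countP_append]
  simp only [List.countP_cons, List.countP_nil]
  by_cases h1 : x ∈ a1 <;> by_cases h2 : x ∈ a2 <;>
    · simp only [hs x, h1, h2]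
      simp

theorem sym_char : ∀ (args : List (List Int)), 2 ≤ args.length →
    (sym args).Nodup ∧ (sym args).Pairwise (· < ·) ∧
      ∀ x, (x ∈ sym args ↔ tally args x % 2 = 1) := by
  intro args
  induction args using sym.induct with
  | case3 args hno =>
      intro hlen
      exfalso
      rcases hr : args.reverse with _ | ⟨x, _ | ⟨y, t⟩⟩
      · have hl := congrArg List.length hr
        simp only [List.length_reverse, List.length_nil] at hl; omega
      · have hl := congrArg List.length hr
        simp only [List.length_reverse, List.length_cons, List.length_nil] at hl; omega
      · exact hno x y t hr
  | case1 args a1 a2 rest h l1 l args' hgt ih =>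
      intro _
      have hs : sym args = sym args' := by
        conv_lhs => rw [sym.eq_def]
        split
        next b1 b2 brest heq =>
          rw [h] at heq
          obtain ⟨rfl, rfl, rfl⟩ : b1 = a1 ∧ b2 = a2 ∧ brest = rest := by
            injection heq with h1 heq; injection heq with h2 h3; exact ⟨h1.symm, h2.symm, h3.symm⟩
          exact if_pos hgt
        next hcon => exact absurd h (hcon a1 a2 rest)
      rw [hs]
      obtain ⟨hnd, hpw, hmem⟩ := ih (by omega)
      refine ⟨hnd, hpw, fun x => ?_⟩
      rw [hmem x]
      have hargs : args = rest.reverse ++ [a2, a1] := by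
        have := congrArg List.reverse h; simpa using this
      have hmem_s : ∀ y, y ∈ PySem.List.sorted l (fun x => x) ↔
          (y ∈ a1 ∧ y ∉ a2) ∨ (y ∈ a2 ∧ y ∉ a1) := fun y =>
        (PySem.List.mem_sorted l (fun x => x) false y).trans (mem_symstep a1 a2 y)
      have hts : tally args' x % 2 = tally (rest.reverse ++ [a2, a1]) x % 2 :=
        tally_step a1 a2 rest x _ hmem_s
      rw [hargs, hts]
  | case2 args a1 a2 rest h l1 l args' hng =>
      intro _
      have hrest : rest = [] := by
        simp only [args', List.length_append, List.length_reverse] at hng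
        cases rest with
        | nil => rfl
        | cons a t => simp at hng
      subst hrest
      have hs : sym args = PySem.List.sorted l (fun x => x) := by
        conv_lhs => rw [sym.eq_def]
        split
        next b1 b2 brest heq =>
          rw [h] at heq
          obtain ⟨rfl, rfl, rfl⟩ : b1 = a1 ∧ b2 = a2 ∧ brest = ([] : List (List Int)) := by
            injection heq with h1 heq; injection heq with h2 h3; exact ⟨h1.symm, h2.symm, h3.symm⟩
          exact (if_neg hng).trans (PySem.List.pyGetD_zero_cons _ _ _)
        next hcon => exact absurd h (hcon a1 a2 [])
      have hmem_s : ∀ y, y ∈ PySem.List.sorted l (fun x => x) ↔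
          (y ∈ a1 ∧ y ∉ a2) ∨ (y ∈ a2 ∧ y ∉ a1) := fun y =>
        (PySem.List.mem_sorted l (fun x => x) false y).trans (mem_symstep a1 a2 y)
      have hnl : l.Nodup := nodup_symfold a1 a2 l1 (nodup_symfold a2 a1 [] List.nodup_nil)
      have hnd : (PySem.List.sorted l (fun x => x)).Nodup :=
        ((PySem.List.sorted_perm l (fun x => x) false).nodup_iff).2 hnl
      have hpw : (PySem.List.sorted l (fun x => x)).Pairwise (· < ·) :=
        ((PySem.List.sorted_pairwise l (fun x => x)).and hnd).imp
          (fun hab => lt_of_le_of_ne hab.1 hab.2)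
      rw [hs]
      refine ⟨hnd, hpw, fun x => ?_⟩
      rw [hmem_s x]
      have hargs : args = [a2, a1] := by
        have := congrArg List.reverse h; simpa using this
      rw [hargs]
      unfold tally
      simp only [List.countP_cons, List.countP_nil]
      by_cases h1 : x ∈ a1 <;> by_cases h2 : x ∈ a2 <;> simp [h1, h2]

theorem sym_alt_char (args : List (List Int)) :
    sym_alt args =
      PySem.List.sorted
        ((PySem.Set.ofList (args.flatMap PySem.List.dedup)).filter
          (fun k => PySem.Int.mod ((args.flatMap PySem.List.dedup).count k : Int) 2 == 1))
        (fun x => x) false := by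
  unfold sym_alt
  rw [← List.foldl_flatMap, PySem.Dict.foldl_insert_getD_add_one_eq_counter]
  simp only [PySem.Dict.items_counter, List.filter_map, List.map_map,
    Function.comp_def, List.map_id']

theorem count_flatMap_dedup (args : List (List Int)) (x : Int) :
    (args.flatMap PySem.List.dedup).count x = tally args x := by
  induction args with
  | nil => rfl
  | cons a t ih =>
      simp only [List.flatMap_cons, List.count_append, tally, List.countP_cons, ih]
      by_cases hx : x ∈ a
      · rw [List.count_eq_one_of_mem (PySem.List.nodup_dedup a) (by simpa [PySem.List.mem_dedup])]
        simp [hx, Nat.add_comm]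
      · rw [List.count_eq_zero_of_not_mem (by simpa [PySem.List.mem_dedup])]
        simp [hx]

-- ===== VERDICT (by name: the statement is the Claim_ definition above) =====
theorem sym_spec : Claim_equal_sym := by
  intro args _ hpre
  unfold Spec_sym
  obtain ⟨hnd, hpw, hmem⟩ := sym_char args hpre
  rw [sym_alt_char]
  refine (PySem.List.sorted_eq_of_perm_of_pairwise_lt _ _ _ ?_ hpw).symm
  refine (List.perm_ext_iff_of_nodup hnd (List.Nodup.filter _ (PySem.Set.nodup_ofList _))).2 ?_
  intro x
  rw [hmem x, List.mem_filter]
  constructor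
  · intro h
    have hx : x ∈ args.flatMap PySem.List.dedup := by
      rw [← List.count_pos_iff, count_flatMap_dedup]; omega
    refine ⟨by simpa [PySem.Set.mem_ofList] using hx, ?_⟩
    rw [count_flatMap_dedup]
    have hc : PySem.Int.mod ((tally args x : Nat) : Int) ((2 : Nat) : Int)
        = ((tally args x % 2 : Nat) : Int) := PySem.Int.mod_natCast _ 2
    push_cast at hc
    simp only [hc, beq_iff_eq]
    omega
  · rintro ⟨_, h⟩
    rw [count_flatMap_dedup] at h
    have hc : PySem.Int.mod ((tally args x : Nat) : Int) ((2 : Nat) : Int)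
        = ((tally args x % 2 : Nat) : Int) := PySem.Int.mod_natCast _ 2
    push_cast at hc
    simp only [hc, beq_iff_eq] at h
    omega
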